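-- pv_equiv track=rewrite | github.com/TurinFohlen/PrimeLog | primelog-0.2.4/primelog-pkg/primelog/core/error_log.py | decode_errors
-- ===== SOURCE A (Python) =====
-- from typing import Dict, List, Optional, Tuple, Any
--
-- prime_map: Dict[str, int] = {
--     "none":             1,   # 乘法单位元, 代表无错误
--     "timeout":          2,
--     "permission_denied":3,
--     "file_not_found":   5,
--     "network_error":    7,
--     "disk_full":        11,
--     "auth_failed":      13,
--     "unknown":          17,  # 未识别异常的默认映射
--     "execution_error":  19,  # 命令执行失败(非零返回码)
-- }
--
-- def decode_errors(composite: int) -> List[str]: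
--     """
--     逆向解码: 通过因式分解从复合值还原错误类型列表.
--     基于算术基本定理(唯一分解定理), 解码是唯一确定的.
--     """
--     if composite <= 1:
--         return ["none"]
--     result = []
--     remaining = composite
--     for err, p in prime_map.items():
--         if p > 1 and remaining % p == 0:
--             result.append(err)
--             while remaining % p == 0:
--                 remaining //= p
--     return result if result else ["unknown"]
-- ===== SOURCE B (Python) =====
-- from typing import Dict, List
--
-- prime_map: Dict[str, int] = {
--     "none":             1,
--     "timeout":          2,
--     "permission_denied":3,
--     "file_not_found":   5,
--     "network_error":    7,
--     "disk_full":        11,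
--     "auth_failed":      13,
--     "unknown":          17,
--     "execution_error":  19,
-- }
--
-- def decode_errors(composite: int) -> List[str]:
--     if composite <= 1:
--         return ["none"]
--     # The mapped primes are pairwise distinct, so whether p divides the
--     # partially-divided `remaining` in A is the same as whether p divides
--     # the original composite: a single stateless comprehension suffices.
--     result = [err for err, p in prime_map.items() if p > 1 and composite % p == 0]
--     return result if result else ["unknown"]
-- ===== Notes on version B (the rewrite author's own statement) =====
-- stated objective: simpler
-- what changed: B replaces A's stateful loop (mutating `remaining`, inner while dividing each prime out) by one stateless list comprehension testing each mapped prime directly against the original composite, which is correct because the mapped primes are pairwise distinct.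
import Mathlib
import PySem

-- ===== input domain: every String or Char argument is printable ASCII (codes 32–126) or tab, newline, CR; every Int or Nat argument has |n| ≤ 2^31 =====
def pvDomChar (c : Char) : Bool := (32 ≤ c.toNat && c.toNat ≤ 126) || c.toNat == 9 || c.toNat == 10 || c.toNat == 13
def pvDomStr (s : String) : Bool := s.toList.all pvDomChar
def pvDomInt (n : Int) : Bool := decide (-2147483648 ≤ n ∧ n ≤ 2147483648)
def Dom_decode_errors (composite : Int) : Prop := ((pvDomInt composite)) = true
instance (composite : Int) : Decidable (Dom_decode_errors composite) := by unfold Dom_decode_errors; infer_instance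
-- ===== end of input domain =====

-- B drops A's mutating `remaining` and its inner dividing-out while loop: since the mapped primes
-- are pairwise distinct, one stateless comprehension testing each prime against the original
-- composite gives the same selection; simpler, no speed claim.

-- ===== PORT A =====
def pvPrimeMap : List (String × Int) :=
  [("none", 1), ("timeout", 2), ("permission_denied", 3), ("file_not_found", 5),
   ("network_error", 7), ("disk_full", 11), ("auth_failed", 13), ("unknown", 17),
   ("execution_error", 19)]

theorem pvDivOut_decr {r p : Int} (h : 2 ≤ p ∧ 1 ≤ r ∧ PySem.Int.mod r p = 0) :
    (PySem.Int.floordiv r p).toNat < r.toNat := by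
  obtain ⟨hp, hr, _⟩ := h
  rw [PySem.Int.floordiv_eq_ediv_of_pos (by omega)]
  have h3 : 0 ≤ r / p := Int.ediv_nonneg (by omega) (by omega)
  have h4 : r / p * p ≤ r := Int.ediv_mul_le r (by omega)
  have h5 : r / p < r := by nlinarith
  omega

-- `while remaining % p == 0: remaining //= p`; the guard's `2 ≤ p ∧ 1 ≤ r` parts only ensure
-- totality (they hold at every call A makes).
def pvDivOut (r p : Int) : Int :=
  if h : 2 ≤ p ∧ 1 ≤ r ∧ PySem.Int.mod r p = 0 then pvDivOut (PySem.Int.floordiv r p) p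
  else r
termination_by r.toNat
decreasing_by exact pvDivOut_decr h

-- one step of A's `for err, p in prime_map.items()` loop, state = (result, remaining)
def pvStepA (st : List String × Int) (ep : String × Int) : List String × Int :=
  if 1 < ep.2 ∧ PySem.Int.mod st.2 ep.2 = 0 then (st.1 ++ [ep.1], pvDivOut st.2 ep.2)
  else st

def decode_errors (composite : Int) : List String :=
  if composite ≤ 1 then ["none"]
  else
    let fin := pvPrimeMap.foldl pvStepA ([], composite)
    if fin.1 = [] then ["unknown"] else fin.1

-- ===== PORT B =====
def decode_errors_alt (composite : Int) : List String :=
  if composite ≤ 1 then ["none"]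
  else
    -- the comprehension `[err for err, p in prime_map.items() if p > 1 and composite % p == 0]`
    let result := (pvPrimeMap.filter
        (fun ep => decide (1 < ep.2 ∧ PySem.Int.mod composite ep.2 = 0))).map Prod.fst
    if result = [] then ["unknown"] else result

-- ===== PRECONDITION & SPEC =====
def Spec_decode_errors (composite : Int) (out : List String) : Prop := out = decode_errors_alt composite
instance (composite : Int) (out : List String) : Decidable (Spec_decode_errors composite out) := by unfold Spec_decode_errors; infer_instance

-- ===== CLAIM (what is proved, stated in full; the proofs are below) =====
def Claim_equal_decode_errors : Prop := ∀ (composite : Int), Dom_decode_errors composite → Spec_decode_errors composite (decode_errors composite)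

-- ===== LEMMAS AND PROOFS =====

theorem pvDivOut_pos_le (r p : Int) : 1 ≤ r → 1 ≤ pvDivOut r p ∧ pvDivOut r p ≤ r := by
  induction r using pvDivOut.induct (p := p) with
  | case1 r h ih =>
    intro hr
    obtain ⟨hp, _, hm⟩ := h
    have hdvd : p ∣ r := (PySem.Int.mod_eq_zero_iff_dvd r p).mp hm
    have hpr : p ≤ r := Int.le_of_dvd (by omega) hdvd
    have h1 : 1 ≤ PySem.Int.floordiv r p :=
      (PySem.Int.le_floordiv_iff_mul_le (by omega)).mpr (by omega)
    have h2 : (PySem.Int.floordiv r p).toNat < r.toNat := pvDivOut_decr ⟨hp, hr, hm⟩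
    rw [pvDivOut, dif_pos ⟨hp, hr, hm⟩]
    have := ih h1
    omega
  | case2 r h =>
    intro hr
    rw [pvDivOut, dif_neg h]
    omega

theorem pvDivOut_dvd_iff (q r p : Int) (hq : Prime q) (hnd : ¬ q ∣ p) :
    q ∣ pvDivOut r p ↔ q ∣ r := by
  induction r using pvDivOut.induct (p := p) with
  | case1 r h ih =>
    obtain ⟨hp, hr, hm⟩ := h
    have hdvd : p ∣ r := (PySem.Int.mod_eq_zero_iff_dvd r p).mp hm
    have heq : r = p * PySem.Int.floordiv r p := by
      rw [PySem.Int.floordiv_eq_ediv_of_pos (by omega)]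
      exact (Int.mul_ediv_cancel' hdvd).symm
    rw [pvDivOut, dif_pos ⟨hp, hr, hm⟩, ih]
    constructor
    · intro hh; rw [heq]; exact Dvd.dvd.mul_left hh p
    · intro hh
      rcases hq.2.2 p (PySem.Int.floordiv r p) (heq ▸ hh) with h1 | h1
      · exact absurd h1 hnd
      · exact h1
  | case2 r h => rw [pvDivOut, dif_neg h]

-- distinct primes > 1 do not divide one another
theorem pv_prime_not_dvd {p q : Int} (hp : Prime p) (hq : Prime q) (h1 : 1 < p) (h2 : 1 < q)
    (hne : q ≠ p) : ¬ q ∣ p := by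
  intro hd
  rcases (Int.associated_iff).mp ((Prime.dvd_prime_iff_associated hq hp).mp hd) with h | h <;> omega

-- A's fold over the prime map selects exactly the names whose prime divides the original composite
theorem pvFoldA_fst (c : Int) (l : List (String × Int)) :
    ∀ (acc : List String) (r : Int), 1 ≤ r →
    (∀ ep ∈ l, 1 < ep.2 → Prime ep.2) →
    l.Pairwise (fun a b => a.2 ≠ b.2) →
    (∀ ep ∈ l, 1 < ep.2 → (ep.2 ∣ r ↔ ep.2 ∣ c)) →
    (l.foldl pvStepA (acc, r)).1 =
      acc ++ (l.filter (fun ep => decide (1 < ep.2 ∧ ep.2 ∣ c))).map Prod.fst := by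
  induction l with
  | nil => intro acc r _ _ _ _; simp
  | cons e t ih =>
    intro acc r hr hprime hpw hiff
    rw [List.foldl_cons]
    by_cases h1 : 1 < e.2
    · have hiffe := hiff e (List.mem_cons_self) h1
      by_cases h2 : e.2 ∣ c
      · have hdvd_r : e.2 ∣ r := hiffe.mpr h2
        have hstep : pvStepA (acc, r) e = (acc ++ [e.1], pvDivOut r e.2) := by
          rw [pvStepA, if_pos ⟨h1, (PySem.Int.mod_eq_zero_iff_dvd r e.2).mpr hdvd_r⟩]
        rw [hstep, ih (acc ++ [e.1]) (pvDivOut r e.2)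
          (pvDivOut_pos_le r e.2 hr).1
          (fun ep hm hp => hprime ep (List.mem_cons_of_mem e hm) hp)
          (List.Pairwise.of_cons hpw)
          ?_]
        · simp [h1, h2]
        · intro ep hm hp
          have hne : ep.2 ≠ e.2 := (List.rel_of_pairwise_cons hpw hm).symm
          rw [pvDivOut_dvd_iff ep.2 r e.2 (hprime ep (List.mem_cons_of_mem e hm) hp)
            (pv_prime_not_dvd (hprime e List.mem_cons_self h1)
              (hprime ep (List.mem_cons_of_mem e hm) hp) h1 hp hne)]
          exact hiff ep (List.mem_cons_of_mem e hm) hp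
      · have hstep : pvStepA (acc, r) e = (acc, r) := by
          rw [pvStepA, if_neg]
          rintro ⟨_, hm⟩
          exact h2 (hiffe.mp ((PySem.Int.mod_eq_zero_iff_dvd r e.2).mp hm))
        rw [hstep, ih acc r hr
          (fun ep hm hp => hprime ep (List.mem_cons_of_mem e hm) hp)
          (List.Pairwise.of_cons hpw)
          (fun ep hm hp => hiff ep (List.mem_cons_of_mem e hm) hp)]
        simp [h1, h2]
    · have hstep : pvStepA (acc, r) e = (acc, r) := by
        rw [pvStepA, if_neg]; rintro ⟨hh, _⟩; exact h1 hh
      rw [hstep, ih acc r hr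
        (fun ep hm hp => hprime ep (List.mem_cons_of_mem e hm) hp)
        (List.Pairwise.of_cons hpw)
        (fun ep hm hp => hiff ep (List.mem_cons_of_mem e hm) hp)]
      simp [h1]

-- ===== VERDICT (by name: the statement is the Claim_ definition above) =====
theorem decode_errors_spec : Claim_equal_decode_errors := by
  unfold Claim_equal_decode_errors
  intro c _
  unfold Spec_decode_errors decode_errors decode_errors_alt
  by_cases hc : c ≤ 1
  · simp [hc]
  · rw [if_neg hc, if_neg hc]
    have hA : (pvPrimeMap.foldl pvStepA ([], c)).1 =
        (pvPrimeMap.filter (fun ep => decide (1 < ep.2 ∧ ep.2 ∣ c))).map Prod.fst := by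
      have := pvFoldA_fst c pvPrimeMap [] c (by omega)
        (by intro ep hm hp
            fin_cases hm
            · exact absurd hp (by norm_num)
            all_goals norm_num)
        (by norm_num [pvPrimeMap])
        (by intro ep hm hp; rfl)
      simpa using this
    have hfilter : pvPrimeMap.filter (fun ep => decide (1 < ep.2 ∧ ep.2 ∣ c)) =
        pvPrimeMap.filter (fun ep => decide (1 < ep.2 ∧ PySem.Int.mod c ep.2 = 0)) := by
      apply List.filter_congr
      intro ep _
      simp [PySem.Int.mod_eq_zero_iff_dvd]
    simp only [hA, hfilter]
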